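-- pv_equiv track=rewrite | github.com/walkersutton/advent-of-code | 2019/4/main.py | first_good
-- ===== SOURCE A (Python) =====
-- def first_good(val):
--   last = -1
--   ret = ''
--   base = ''
--   same = False
--   for ch in val:
--     if same:
--       ret += base
--     elif int(ch) < last:
--       same = True
--       base = str(last)
--       ret += base
--     else:
--       ret += ch
--       last = int(ch)
--   return ret
-- ===== SOURCE B (Python) =====
-- def first_good(val):
--     last = -1
--     for i, ch in enumerate(val):
--         d = int(ch)
--         if d < last:
--             return val[:i] + str(last) * (len(val) - i)
--         last = d
--     return val
-- ===== Notes on version B (the rewrite author's own statement) =====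
-- stated objective: simpler
-- what changed: Instead of accumulating a result string in a stateful loop with a same-flag and a base buffer, B scans for the first decrease and returns the prefix plus a closed-form repeated-fill suffix via string multiplication, returning the input unchanged if no decrease occurs; Pre_ excludes strings with a non-digit character reached before any decrease, on which A raises ValueError.
import Mathlib
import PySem

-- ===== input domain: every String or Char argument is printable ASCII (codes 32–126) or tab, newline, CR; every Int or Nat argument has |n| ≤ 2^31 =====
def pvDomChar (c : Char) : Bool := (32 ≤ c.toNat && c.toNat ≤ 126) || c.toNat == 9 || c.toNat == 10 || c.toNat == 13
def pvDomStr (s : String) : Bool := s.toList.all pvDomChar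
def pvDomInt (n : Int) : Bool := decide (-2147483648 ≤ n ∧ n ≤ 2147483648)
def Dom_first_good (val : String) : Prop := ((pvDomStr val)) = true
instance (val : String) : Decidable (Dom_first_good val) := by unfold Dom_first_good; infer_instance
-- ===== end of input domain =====

-- B replaces A's stateful accumulator loop (flag `same`, buffer `base`) by an early
-- return at the first decrease, with a closed-form prefix + repeated-fill suffix.
-- Pre_ excludes strings where a non-digit char is reached before any decrease (A raises ValueError there).

-- int(ch) for a single character ch; inside Pre_ every char this is applied to is a digit,
-- so ofStr? is some and the .getD 0 default is never reached
def pvDigit (ch : Char) : Int := (PySem.Int.ofStr? (String.ofList [ch])).getD 0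

-- ===== PORT A =====
-- the loop of A, carrying its four state variables (last, ret, base, same)
def goA (cs : List Char) (last : Int) (ret : List Char) (base : List Char) (same : Bool) : List Char :=
  match cs with
  | [] => ret
  | ch :: t =>
    if same then goA t last (ret ++ base) base same
    else if pvDigit ch < last then
      goA t last (ret ++ (PySem.Int.toStr last).toList) (PySem.Int.toStr last).toList true
    else goA t (pvDigit ch) (ret ++ [ch]) base same

def first_good (val : String) : String :=
  String.ofList (goA val.toList (-1) [] [] false)

-- ===== PORT B =====
-- the loop of B: index i, current last; early return with val[:i] + str(last)*(len-i)
def goB (cs : List Char) (last : Int) (i : Nat) (val : List Char) : List Char :=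
  match cs with
  | ch :: t =>
    let d := pvDigit ch
    if d < last then
      val.take i ++ (List.replicate (val.length - i) (PySem.Int.toStr last).toList).flatten
    else goB t d (i + 1) val
  | [] => val

def first_good_alt (val : String) : String :=
  String.ofList (goB val.toList (-1) 0 val.toList)

-- ===== PRECONDITION & SPEC =====
-- exactly the inputs on which A returns: int(ch) raises ValueError on the first non-digit
-- char it reaches, so A returns iff the string is all digits OR a decrease occurs inside
-- the leading digit prefix (after a decrease the remaining chars are never converted)
def pvNonDec : List Char → Bool
  | a :: b :: t => a ≤ b && pvNonDec (b :: t)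
  | _ => true
def Pre_first_good (val : String) : Prop :=
  val.toList.takeWhile Char.isDigit = val.toList ∨
    pvNonDec (val.toList.takeWhile Char.isDigit) = false
instance (val : String) : Decidable (Pre_first_good val) := by unfold Pre_first_good; infer_instance
def pvWitness_first_good : String := "98765432109876543210987"

def Spec_first_good (val : String) (out : String) : Prop := out = first_good_alt val
instance (val : String) (out : String) : Decidable (Spec_first_good val out) := by unfold Spec_first_good; infer_instance

-- ===== CLAIM (what is proved, stated in full; the proofs are below) =====
def Claim_equal_first_good : Prop := ∀ (val : String), Dom_first_good val → Pre_first_good val → Spec_first_good val (first_good val)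

-- ===== LEMMAS AND PROOFS =====

-- common reference: copy chars until the first decrease, then the closed-form fill
def refF (cs : List Char) (last : Int) : List Char :=
  match cs with
  | [] => []
  | ch :: t =>
    if pvDigit ch < last then (List.replicate (t.length + 1) (PySem.Int.toStr last).toList).flatten
    else ch :: refF t (pvDigit ch)

theorem goA_same (cs : List Char) (last : Int) (ret base : List Char) :
    goA cs last ret base true = ret ++ (List.replicate cs.length base).flatten := by
  induction cs generalizing ret with
  | nil => simp [goA]
  | cons ch t ih => simp [goA, ih, List.replicate_succ, List.append_assoc]

theorem goA_eq_refF (cs : List Char) (last : Int) (ret base : List Char) :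
    goA cs last ret base false = ret ++ refF cs last := by
  induction cs generalizing last ret base with
  | nil => simp [goA, refF]
  | cons ch t ih =>
    by_cases h : pvDigit ch < last
    · simp [goA, refF, h, goA_same, List.replicate_succ, List.append_assoc]
    · simp [goA, refF, h, ih, List.append_assoc]

theorem goB_eq_refF (cs : List Char) (last : Int) (i : Nat) (val : List Char)
    (hcs : cs = val.drop i) :
    goB cs last i val = val.take i ++ refF cs last := by
  induction cs generalizing last i with
  | nil =>
    have hi : val.length ≤ i := by
      have := congrArg List.length hcs
      simp at this; omega
    simp [goB, refF, List.take_of_length_le hi]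
  | cons ch t ih =>
    have hi : i < val.length := by
      by_contra h
      rw [List.drop_eq_nil_of_le (by omega)] at hcs; simp at hcs
    have hget : val[i] = ch := by
      have := List.drop_eq_getElem_cons hi
      rw [← hcs] at this; exact (List.cons.injEq _ _ _ _ ▸ this).1.symm
    have ht : t = val.drop (i + 1) := by
      have := List.drop_eq_getElem_cons hi
      rw [← hcs] at this; exact (List.cons.injEq _ _ _ _ ▸ this).2
    have hlen : t.length + 1 = val.length - i := by
      have := congrArg List.length hcs
      simp at this; omega
    by_cases h : pvDigit ch < last
    · simp [goB, refF, h, hlen]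
    · rw [goB, refF]
      simp only [h]
      rw [ih (pvDigit ch) (i + 1) ht]
      rw [List.take_add_one, List.getElem?_eq_getElem hi, hget]
      simp [List.append_assoc]

-- ===== VERDICT (by name: the statement is the Claim_ definition above) =====
theorem first_good_spec : Claim_equal_first_good := by
  intro val _ _
  unfold Spec_first_good first_good first_good_alt
  rw [goA_eq_refF, goB_eq_refF _ _ 0 _ (by simp)]
  simp
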